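-- pv_equiv track=rewrite | github.com/beyondthemist/Problem-solving-solution | Programmers/lv.2/42586/solution.py | solution
-- ===== SOURCE A (Python) =====
-- def solution(progresses, speeds):
--     answer = []
--     while len(progresses) >= 1:
--         #각 작업의 작업속도 별로 작업 진행
--         for i in range(len(progresses)):
--             progresses[i] += speeds[i]
--
--         #앞의 작업이 완료되면
--         if progresses[0] >= 100:
--             count = 0
--
--             #뒤의 모든 작업과 그의 작업속도를 작업 큐에서 제거함
--             while len(progresses) >= 1 and progresses[0] >= 100:
--                 count += 1
--                 progresses.pop(0)
--                 speeds.pop(0)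
--             answer.append(count)
--
--     return answer
-- ===== SOURCE B (Python) =====
-- def solution(progresses, speeds):
--     # finish day of task i: smallest d >= 1 with p + d*s >= 100, i.e. max(1, ceil((100-p)/s))
--     days = [max(1, -((p - 100) // s)) for p, s in zip(progresses, speeds)]
--     answer = []
--     i, n = 0, len(days)
--     while i < n:
--         lead = days[i]
--         j = i + 1
--         while j < n and days[j] <= lead:
--             j += 1
--         answer.append(j - i)
--         i = j
--     return answer
-- ===== Notes on version B (the rewrite author's own statement) =====
-- stated objective: faster
-- what changed: B replaces A's day-by-day simulation (incrementing every remaining task each day and popping finished prefixes) with a closed-form finish day max(1, ceil((100-p)/s)) per task followed by one linear grouping pass; intended as asymptotically faster — a timing run saw A time out at n=16 where B returned, but could not verify a clean ratio — so take 'faster' as intended, measured only as that timeout; …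
-- outside the precondition, e.g. on solution([100], [0]): A returns [1], B raises ZeroDivisionError; on solution([150, 1], [-10, 60]): A returns [1, 1], B returns [2]
import Mathlib
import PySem

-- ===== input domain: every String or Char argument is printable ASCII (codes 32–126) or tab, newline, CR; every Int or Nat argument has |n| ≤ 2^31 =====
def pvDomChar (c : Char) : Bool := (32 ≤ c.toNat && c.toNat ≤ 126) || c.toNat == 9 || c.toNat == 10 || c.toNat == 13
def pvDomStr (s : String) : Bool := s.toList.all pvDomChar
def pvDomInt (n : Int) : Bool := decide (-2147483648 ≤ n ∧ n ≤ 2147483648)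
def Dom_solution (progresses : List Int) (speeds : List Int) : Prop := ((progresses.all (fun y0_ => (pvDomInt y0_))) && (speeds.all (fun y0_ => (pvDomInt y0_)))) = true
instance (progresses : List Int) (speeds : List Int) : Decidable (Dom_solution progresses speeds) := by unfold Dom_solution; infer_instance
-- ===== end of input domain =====

-- B replaces A's day-by-day simulation with closed-form finish days and one grouping pass
-- (intended as asymptotically faster; a timing run saw A time out at n=16 where B
-- returned, but could not measure a ratio); equivalence is about the RETURN value only —
-- Python A mutates (increments/pops) its two argument lists in place, B does not.

-- ===== PORT A =====
-- inner `while len(progresses) >= 1 and progresses[0] >= 100`: pop the finished prefix,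
-- counting; pops speeds in step (`ss.tail`; Python raises there if speeds is exhausted,
-- which Pre_ excludes).
def popCount : List Int → List Int → Int × List Int × List Int
  | p :: ps, ss =>
    if 100 ≤ p then
      let r := popCount ps ss.tail
      (r.1 + 1, r.2.1, r.2.2)
    else (0, p :: ps, ss)
  | [], ss => (0, [], ss)

-- the outer `while len(progresses) >= 1` loop, one fuel unit per simulated day; the fuel
-- given below is provably larger than the number of days A simulates on any input in
-- Dom ∧ Pre, so it never runs out there.  The `[] => ans` arm of the inner match is
-- unreachable under Pre_ (in Python that shape raises IndexError at `speeds[i]`).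
def solLoop : Nat → List Int → List Int → List Int → List Int
  | 0, _, _, ans => ans
  | fuel+1, ps, ss, ans =>
    match ps with
    | [] => ans
    | _ :: _ =>
      match List.zipWith (· + ·) ps ss with
      | [] => ans
      | p :: ps' =>
        if 100 ≤ p then
          let r := popCount (p :: ps') ss
          solLoop fuel r.2.1 r.2.2 (ans ++ [r.1])
        else
          solLoop fuel (p :: ps') ss ans

def solution (progresses : List Int) (speeds : List Int) : List Int :=
  solLoop (progresses.length * 17179869184 + 1) progresses speeds []

-- ===== PORT B =====
-- ceil((100-p)/s) = -((p-100)//s), clamped to at least one day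
def finishDay (p s : Int) : Int := max 1 (-(PySem.Int.floordiv (p - 100) s))

-- Source B's grouping pass: the inner `while j < n and days[j] <= lead` forward scan is
-- takeWhile/dropWhile on the remaining list
def groupRec : List Int → List Int
  | [] => []
  | d :: rest =>
    (((rest.takeWhile (fun x => decide (x ≤ d))).length : Int) + 1) ::
      groupRec (rest.dropWhile (fun x => decide (x ≤ d)))
  termination_by l => l.length
  decreasing_by
    exact Nat.lt_succ_of_le (List.length_dropWhile_le _ _)

def solution_alt (progresses : List Int) (speeds : List Int) : List Int :=
  groupRec (List.zipWith finishDay progresses speeds)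

-- ===== PRECONDITION & SPEC =====
-- Pre_ excludes inputs where Python A raises IndexError (speeds shorter than progresses)
-- and inputs with a used non-positive speed: on those A loops forever except on corner
-- inputs already at/over the 100% threshold, where B's ceiling formula is meaningless
-- (zero or negative divisor).
def Pre_solution (progresses : List Int) (speeds : List Int) : Prop :=
  progresses.length ≤ speeds.length ∧ ∀ q ∈ progresses.zip speeds, 1 ≤ q.2
instance (progresses : List Int) (speeds : List Int) : Decidable (Pre_solution progresses speeds) := by unfold Pre_solution; infer_instance

def pvWitness_solution : List Int × List Int := ([93, 30, 55], [1, 30, 5])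

def Spec_solution (progresses : List Int) (speeds : List Int) (out : List Int) : Prop := out = solution_alt progresses speeds
instance (progresses : List Int) (speeds : List Int) (out : List Int) : Decidable (Spec_solution progresses speeds out) := by unfold Spec_solution; infer_instance

-- ===== CLAIM (what is proved, stated in full; the proofs are below) =====
def Claim_equal_solution : Prop := ∀ (progresses : List Int) (speeds : List Int), Dom_solution progresses speeds → Pre_solution progresses speeds → Spec_solution progresses speeds (solution progresses speeds)

-- ===== LEMMAS AND PROOFS =====

-- the unclamped ceiling ceil((100-p)/s) and the clamp, so that adding a day of speed
-- shifts the whole list by exactly one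
def ceilC (p s : Int) : Int := -(PySem.Int.floordiv (p - 100) s)
def clampF (c : Int) : Int := max 1 c
def sumD (l : List Int) : Nat := (l.map Int.toNat).sum

lemma finishDay_eq (p s : Int) : finishDay p s = clampF (ceilC p s) := rfl

lemma floordiv_bracket (a s : Int) (hs : 0 < s) :
    PySem.Int.floordiv a s * s ≤ a ∧ a < (PySem.Int.floordiv a s + 1) * s := by
  have := (PySem.Int.floordiv_eq_iff_of_pos (a := a) (b := s) (q := PySem.Int.floordiv a s) hs).1 rfl
  exact this

lemma ceilC_add (p s : Int) (hs : 0 < s) : ceilC (p + s) s = ceilC p s - 1 := by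
  unfold ceilC
  have h1 : PySem.Int.floordiv (p + s - 100) s = PySem.Int.floordiv (p - 100) s + 1 := by
    rcases floordiv_bracket (p - 100) s hs with ⟨hl, hr⟩
    rw [PySem.Int.floordiv_eq_iff_of_pos hs]
    constructor <;> nlinarith
  rw [h1]; ring

lemma day_le_one_iff (p s : Int) (hs : 0 < s) : (finishDay p s ≤ 1 ↔ 100 ≤ p + s) := by
  unfold finishDay
  have h : (-1 : Int) ≤ PySem.Int.floordiv (p - 100) s ↔ -1 * s ≤ p - 100 :=
    PySem.Int.le_floordiv_iff_mul_le hs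
  constructor
  · intro hle
    have : -(PySem.Int.floordiv (p - 100) s) ≤ 1 := le_trans (le_max_right _ _) hle
    have : (-1 : Int) ≤ PySem.Int.floordiv (p - 100) s := by omega
    have := h.1 this
    omega
  · intro h100
    have : (-1 : Int) ≤ PySem.Int.floordiv (p - 100) s := h.2 (by omega)
    omega

lemma one_le_finishDay (p s : Int) : 1 ≤ finishDay p s := le_max_left _ _

-- days list is clamp of ceil list
lemma days_eq (ps ss : List Int) :
    List.zipWith finishDay ps ss = (List.zipWith ceilC ps ss).map clampF := by
  rw [List.map_zipWith]; rfl

-- adding one day of speed shifts the ceil list down by one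
lemma ceil_shift (ps ss : List Int) (hpos : ∀ q ∈ ps.zip ss, 1 ≤ q.2) :
    List.zipWith ceilC (List.zipWith (· + ·) ps ss) ss
      = (List.zipWith ceilC ps ss).map (fun x => x - 1) := by
  induction ps generalizing ss with
  | nil => simp
  | cons p pt ih =>
    cases ss with
    | nil => simp
    | cons s st =>
      have hs : (1:Int) ≤ s := hpos (p, s) (by simp)
      simp only [List.zipWith, List.map]
      rw [ceilC_add p s (by omega), ih st (fun q hq => hpos q (by simp [hq]))]

lemma zip_add_pos (ps ss : List Int) (hpos : ∀ q ∈ ps.zip ss, 1 ≤ q.2) :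
    ∀ q ∈ (List.zipWith (· + ·) ps ss).zip ss, 1 ≤ q.2 := by
  induction ps generalizing ss with
  | nil => simp
  | cons p pt ih =>
    cases ss with
    | nil => simp
    | cons s st =>
      intro q hq
      simp only [List.zipWith, List.zip_cons_cons, List.mem_cons] at hq
      rcases hq with h | h
      · subst h; exact hpos (p, s) (by simp)
      · exact ih st (fun q hq => hpos q (by simp [hq])) q h

lemma drop_zipWith {α β γ : Type} (f : α → β → γ) (k : Nat) (ps : List α) (ss : List β) :
    (List.zipWith f ps ss).drop k = List.zipWith f (ps.drop k) (ss.drop k) := by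
  induction k generalizing ps ss with
  | zero => simp
  | succ k ih =>
    cases ps with
    | nil => simp
    | cons p pt =>
      cases ss with
      | nil => simp
      | cons s st => simpa using ih pt st

lemma dropWhile_eq_drop (p : Int → Bool) (l : List Int) :
    l.dropWhile p = l.drop (l.takeWhile p).length := by
  induction l with
  | nil => simp
  | cons x xs ih =>
    by_cases h : p x = true
    · simp [h, ih]
    · simp [h]

lemma head_dropWhile (p : Int → Bool) (l : List Int) (y : Int) (yt : List Int)
    (h : l.dropWhile p = y :: yt) : p y = false := by
  induction l with
  | nil => simp at h
  | cons x xs ih =>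
    by_cases hx : p x = true
    · simp [hx] at h; exact ih h
    · simp [hx] at h
      rw [← h.1]; simpa using hx

-- popCount on the incremented list = the takeWhile(day ≤ 1) prefix of the days list
lemma popCount_spec (ps ss : List Int) (hpos : ∀ q ∈ ps.zip ss, 1 ≤ q.2) :
    popCount (List.zipWith (· + ·) ps ss) ss =
      ((((List.zipWith finishDay ps ss).takeWhile (fun d => decide (d ≤ 1))).length : Int),
       List.zipWith (· + ·)
         (ps.drop ((List.zipWith finishDay ps ss).takeWhile (fun d => decide (d ≤ 1))).length)
         (ss.drop ((List.zipWith finishDay ps ss).takeWhile (fun d => decide (d ≤ 1))).length),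
       ss.drop ((List.zipWith finishDay ps ss).takeWhile (fun d => decide (d ≤ 1))).length) := by
  induction ps generalizing ss with
  | nil => simp [popCount]
  | cons p pt ih =>
    cases ss with
    | nil => simp [popCount]
    | cons s st =>
      have hs : (1:Int) ≤ s := hpos (p, s) (by simp)
      have hd : (decide (finishDay p s ≤ 1)) = (decide (100 ≤ p + s)) := by
        simp [day_le_one_iff p s (by omega)]
      by_cases h : 100 ≤ p + s
      · have ihst := ih st (fun q hq => hpos q (by simp [hq]))
        simp only [List.zipWith, popCount, List.tail_cons, ihst, List.takeWhile_cons, hd]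
        simp only [h, decide_true, if_pos, List.length_cons, List.drop_succ_cons,
          Prod.mk.injEq]
        push_cast
        simp [add_comm]
      · simp only [List.zipWith, popCount, List.takeWhile_cons, hd]
        simp [h]

-- grouping is invariant under shifting all ceilings down by one, as long as the head
-- needs at least two more days
lemma groupRec_shift : ∀ (n : Nat) (cs : List Int), cs.length ≤ n →
    (∀ c ct, cs = c :: ct → 2 ≤ c) →
    groupRec ((cs.map (fun x => x - 1)).map clampF) = groupRec (cs.map clampF) := by
  intro n
  induction n with
  | zero =>
    intro cs h _
    have hcs : cs = [] := List.length_eq_zero_iff.1 (Nat.le_zero.1 h)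
    subst hcs; simp
  | succ n ih =>
    intro cs hlen hhead
    cases cs with
    | nil => simp
    | cons c rest =>
      have hc : 2 ≤ c := hhead c rest rfl
      have hclampc : clampF c = c := by simp [clampF]; omega
      have hclampc1 : clampF (c - 1) = c - 1 := by simp [clampF]; omega
      have hpred : (fun y => decide (clampF (y - 1) ≤ c - 1)) = (fun y => decide (clampF y ≤ c)) := by
        funext y
        simp only [decide_eq_decide, clampF]
        omega
      simp only [List.map_cons, List.map_map, hclampc, hclampc1, groupRec,
        List.takeWhile_map, List.dropWhile_map, Function.comp_def, hpred]
      congr 1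
      · simp
      · set rest' := rest.dropWhile (fun y => decide (clampF y ≤ c)) with hrest'
        have h1 : (rest'.map (fun x => x - 1)).map clampF
            = rest'.map (fun y => clampF (y - 1)) := by simp [List.map_map, Function.comp_def]
        rw [← h1]
        apply ih
        · have := List.length_dropWhile_le (fun y => decide (clampF y ≤ c)) rest
          have : rest'.length ≤ rest.length := this
          simp at hlen; omega
        · intro y yt hy
          have := head_dropWhile (fun y => decide (clampF y ≤ c)) rest y yt (by rw [← hrest', hy])
          simp [clampF] at this
          omega

-- monotonicity of the day-sum under the one-day shift
lemma sumD_shift_le (cs : List Int) :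
    sumD ((cs.map (fun x => x - 1)).map clampF) ≤ sumD (cs.map clampF) := by
  induction cs with
  | nil => simp [sumD]
  | cons c rest ih =>
    simp only [List.map_cons, sumD, List.map, List.sum_cons] at *
    have : (clampF (c - 1)).toNat ≤ (clampF c).toNat := by simp [clampF]; omega
    omega

lemma sumD_ge_length (l : List Int) (h : ∀ x ∈ l, 1 ≤ x) : l.length ≤ sumD l := by
  induction l with
  | nil => simp [sumD]
  | cons x xs ih =>
    simp only [sumD, List.map, List.sum_cons, List.length_cons] at *
    have hx : 1 ≤ x := h x (by simp)
    have := ih (fun y hy => h y (by simp [hy]))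
    omega

lemma sumD_append (l₁ l₂ : List Int) : sumD (l₁ ++ l₂) = sumD l₁ + sumD l₂ := by
  simp [sumD]

-- every clamped day is at least 1
lemma days_ge_one (ps ss : List Int) : ∀ d ∈ List.zipWith finishDay ps ss, 1 ≤ d := by
  rw [days_eq]
  intro d hd
  rcases List.mem_map.1 hd with ⟨c, _, rfl⟩
  exact le_max_left _ _

-- positivity of the used speeds survives dropping a popped group
lemma pos_drop (ps ss : List Int) (k : Nat) (hpos : ∀ q ∈ ps.zip ss, 1 ≤ q.2) :
    ∀ q ∈ (ps.drop k).zip (ss.drop k), 1 ≤ q.2 := by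
  intro q hq
  apply hpos
  have h1 : (ps.drop k).zip (ss.drop k) = (ps.zip ss).drop k := by
    rw [List.zip_eq_zipWith, List.zip_eq_zipWith]
    exact (drop_zipWith Prod.mk k ps ss).symm
  rw [h1] at hq
  exact List.mem_of_mem_drop hq

-- a head that is not yet finished needs at least two more days
lemma two_le_ceil_of_not (p s : Int) (hs : 1 ≤ s) (h : ¬ 100 ≤ p + s) : 2 ≤ ceilC p s := by
  have h1 : ¬ finishDay p s ≤ 1 := fun hle => h ((day_le_one_iff p s (by omega)).1 hle)
  have h2 : finishDay p s = clampF (ceilC p s) := finishDay_eq p s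
  simp only [clampF] at h2
  omega

-- the head of a group finishes in exactly one day
lemma day_eq_one (p s : Int) (hs : 1 ≤ s) (h : 100 ≤ p + s) : finishDay p s = 1 :=
  le_antisymm ((day_le_one_iff p s (by omega)).2 h) (one_le_finishDay p s)

-- one simulated day burns one fuel unit of the day-sum
lemma sumD_step (c : Int) (crest : List Int) (hc : 2 ≤ c) :
    sumD (((c :: crest).map (fun x => x - 1)).map clampF) + 1
      ≤ sumD ((c :: crest).map clampF) := by
  have h := sumD_shift_le crest
  simp only [List.map_cons, sumD, List.sum_cons] at *
  have h1 : clampF (c - 1) = c - 1 := by simp [clampF]; omega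
  have h2 : clampF c = c := by simp [clampF]; omega
  rw [h1, h2]
  omega

-- MAIN LEMMA: the fueled simulation computes the grouping of the finish days,
-- provided the fuel covers the total day-sum
lemma solLoop_eq : ∀ (fuel : Nat) (ps ss ans : List Int),
    ps.length ≤ ss.length →
    (∀ q ∈ ps.zip ss, 1 ≤ q.2) →
    sumD (List.zipWith finishDay ps ss) ≤ fuel →
    solLoop fuel ps ss ans = ans ++ groupRec (List.zipWith finishDay ps ss) := by
  intro fuel
  induction fuel with
  | zero =>
    intro ps ss ans hlen hpos hsum
    cases ps with
    | nil => simp [solLoop, groupRec]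
    | cons p pt =>
      exfalso
      cases ss with
      | nil => simp at hlen
      | cons s st =>
        have h1 := one_le_finishDay p s
        simp only [List.zipWith_cons_cons, sumD, List.map_cons, List.sum_cons] at hsum
        omega
  | succ fuel ih =>
    intro ps ss ans hlen hpos hsum
    cases ps with
    | nil => simp [solLoop, groupRec]
    | cons p pt =>
      cases ss with
      | nil => simp at hlen
      | cons s st =>
        have hs : (1:Int) ≤ s := hpos (p, s) (by simp)
        have hz : (p + s) :: List.zipWith (· + ·) pt st
            = List.zipWith (· + ·) (p :: pt) (s :: st) := rfl
        by_cases h : 100 ≤ p + s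
        · -- pop branch: a whole group finishes today
          simp only [solLoop, List.zipWith_cons_cons, if_pos h]
          rw [hz, popCount_spec (p :: pt) (s :: st) hpos]
          dsimp only
          set ps0 : List Int := p :: pt with hps0
          set ss0 : List Int := s :: st with hss0
          set days := List.zipWith finishDay ps0 ss0 with hdaysd
          set K := (days.takeWhile (fun d => decide (d ≤ 1))).length with hKd
          have hposK : ∀ q ∈ (ps0.drop K).zip (ss0.drop K), 1 ≤ q.2 := pos_drop ps0 ss0 K hpos
          have hdrop : List.zipWith finishDay (ps0.drop K) (ss0.drop K)
              = days.dropWhile (fun d => decide (d ≤ 1)) := by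
            rw [hdaysd, hKd, ← drop_zipWith, ← dropWhile_eq_drop]
          have hdays2 : List.zipWith finishDay
                (List.zipWith (· + ·) (ps0.drop K) (ss0.drop K)) (ss0.drop K)
              = ((List.zipWith ceilC (ps0.drop K) (ss0.drop K)).map (fun x => x - 1)).map clampF := by
            rw [days_eq, ceil_shift _ _ hposK]
          have hhead2 : ∀ c ct, List.zipWith ceilC (ps0.drop K) (ss0.drop K) = c :: ct → 2 ≤ c := by
            intro c ct hc
            have hgl : days.dropWhile (fun d => decide (d ≤ 1)) = clampF c :: ct.map clampF := by
              rw [← hdrop, days_eq, hc, List.map_cons]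
            have hfalse := head_dropWhile _ days _ _ hgl
            simp only [decide_eq_false_iff_not, not_le, clampF] at hfalse ⊢
            omega
          have hgr2 : groupRec (List.zipWith finishDay
                (List.zipWith (· + ·) (ps0.drop K) (ss0.drop K)) (ss0.drop K))
              = groupRec (days.dropWhile (fun d => decide (d ≤ 1))) := by
            rw [hdays2, groupRec_shift (List.zipWith ceilC (ps0.drop K) (ss0.drop K)).length _
              le_rfl hhead2, ← days_eq, hdrop]
          have hd1 : finishDay p s = 1 := day_eq_one p s hs h
          have hdays_cons : days = 1 :: List.zipWith finishDay pt st := by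
            rw [hdaysd, hps0, hss0, List.zipWith_cons_cons, hd1]
          have hK1 : 1 ≤ K := by
            rw [hKd, hdays_cons, List.takeWhile_cons]
            simp
          have hsum2 : sumD (List.zipWith finishDay
                (List.zipWith (· + ·) (ps0.drop K) (ss0.drop K)) (ss0.drop K)) ≤ fuel := by
            have e1 : sumD (List.zipWith finishDay
                  (List.zipWith (· + ·) (ps0.drop K) (ss0.drop K)) (ss0.drop K))
                ≤ sumD (List.zipWith finishDay (ps0.drop K) (ss0.drop K)) := by
              rw [hdays2]
              have := sumD_shift_le (List.zipWith ceilC (ps0.drop K) (ss0.drop K))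
              rw [days_eq (ps0.drop K) (ss0.drop K)]
              exact this
            have e2 : sumD days = sumD (days.takeWhile (fun d => decide (d ≤ 1)))
                + sumD (days.dropWhile (fun d => decide (d ≤ 1))) := by
              conv_lhs => rw [← List.takeWhile_append_dropWhile
                (p := fun d => decide (d ≤ 1)) (l := days)]
              exact sumD_append _ _
            have e3 : K ≤ sumD (days.takeWhile (fun d => decide (d ≤ 1))) := by
              rw [hKd]
              apply sumD_ge_length
              intro x hx
              exact days_ge_one ps0 ss0 x ((List.takeWhile_sublist _).subset hx)
            rw [hdrop] at e1
            omega
          have hlen2 : (List.zipWith (· + ·) (ps0.drop K) (ss0.drop K)).length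
              ≤ (ss0.drop K).length := by
            simp [List.length_zipWith]
          have hrec := ih (List.zipWith (· + ·) (ps0.drop K) (ss0.drop K)) (ss0.drop K)
            (ans ++ [(K : Int)]) hlen2 (zip_add_pos _ _ hposK) hsum2
          rw [hrec, hgr2, hd1, ← hdays_cons]
          have hgroup : groupRec days
              = (K : Int) :: groupRec (days.dropWhile (fun d => decide (d ≤ 1))) := by
            rw [hdays_cons, groupRec]
            have hKval : K
                = ((List.zipWith finishDay pt st).takeWhile (fun d => decide (d ≤ 1))).length + 1 := by
              rw [hKd, hdays_cons, List.takeWhile_cons]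
              simp
            rw [hKval, List.dropWhile_cons]
            push_cast
            simp [add_comm]
          rw [hgroup]
          simp
        · -- no pop: one day passes, the grouping is unchanged
          simp only [solLoop, List.zipWith_cons_cons, if_neg h]
          rw [hz]
          set ps0 : List Int := p :: pt with hps0
          set ss0 : List Int := s :: st with hss0
          have hposs := zip_add_pos ps0 ss0 hpos
          have hdays1 : List.zipWith finishDay (List.zipWith (· + ·) ps0 ss0) ss0
              = ((List.zipWith ceilC ps0 ss0).map (fun x => x - 1)).map clampF := by
            rw [days_eq, ceil_shift _ _ hpos]
          have hc2 : 2 ≤ ceilC p s := two_le_ceil_of_not p s hs h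
          have hcs_cons : List.zipWith ceilC ps0 ss0 = ceilC p s :: List.zipWith ceilC pt st := rfl
          have hhead : ∀ c ct, List.zipWith ceilC ps0 ss0 = c :: ct → 2 ≤ c := by
            intro c ct hc
            rw [hcs_cons] at hc
            cases hc
            exact hc2
          have hsum1 : sumD (List.zipWith finishDay (List.zipWith (· + ·) ps0 ss0) ss0) ≤ fuel := by
            have hstep := sumD_step (ceilC p s) (List.zipWith ceilC pt st) hc2
            rw [days_eq, hcs_cons] at hsum
            rw [hdays1, hcs_cons]
            omega
          have hlen1 : (List.zipWith (· + ·) ps0 ss0).length ≤ ss0.length := by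
            simp [List.length_zipWith]
          have hrec := ih (List.zipWith (· + ·) ps0 ss0) ss0 ans hlen1 hposs hsum1
          rw [hrec, hdays1,
            groupRec_shift (List.zipWith ceilC ps0 ss0).length _ le_rfl hhead, ← days_eq]
          rfl

-- bound on the day-sum from the domain bounds, providing the fuel
lemma finishDay_le (p s : Int) (hp : -2147483648 ≤ p) (hs1 : 1 ≤ s) :
    (finishDay p s).toNat ≤ 17179869184 := by
  have h0 : (0:Int) < s := by omega
  have h1 : (-17179869184 : Int) * s ≤ p - 100 := by nlinarith
  have h2 : (-17179869184 : Int) ≤ PySem.Int.floordiv (p - 100) s :=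
    (PySem.Int.le_floordiv_iff_mul_le h0).2 h1
  unfold finishDay
  omega

lemma sumD_bound : ∀ (ps ss : List Int),
    (∀ p ∈ ps, -2147483648 ≤ p) →
    (∀ q ∈ ps.zip ss, 1 ≤ q.2 ∧ q.2 ≤ 2147483648) →
    sumD (List.zipWith finishDay ps ss) ≤ ps.length * 17179869184 := by
  intro ps
  induction ps with
  | nil => intro ss _ _; simp [sumD]
  | cons p pt ih =>
    intro ss hp hs
    cases ss with
    | nil => simp [sumD]
    | cons s st =>
      have h1 : (finishDay p s).toNat ≤ 17179869184 :=
        finishDay_le p s (hp p (by simp)) (hs (p, s) (by simp)).1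
      have h2 := ih st (fun x hx => hp x (by simp [hx])) (fun q hq => hs q (by simp [hq]))
      simp only [List.zipWith_cons_cons, sumD, List.map_cons, List.sum_cons, List.length_cons] at *
      omega

-- ===== VERDICT (by name: the statement is the Claim_ definition above) =====
theorem solution_spec : Claim_equal_solution := by
  intro ps ss hdom hpre
  unfold Spec_solution solution solution_alt
  rcases hpre with ⟨hlen, hpos⟩
  have hdom' : (∀ p ∈ ps, -2147483648 ≤ p) ∧ (∀ s ∈ ss, s ≤ 2147483648) := by
    unfold Dom_solution at hdom
    simp only [Bool.and_eq_true, List.all_eq_true, pvDomInt, decide_eq_true_eq] at hdom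
    exact ⟨fun p hp => (hdom.1 p hp).1, fun s hsm => (hdom.2 s hsm).2⟩
  have hb : sumD (List.zipWith finishDay ps ss) ≤ ps.length * 17179869184 := by
    apply sumD_bound ps ss hdom'.1
    intro q hq
    obtain ⟨a, b⟩ := q
    exact ⟨hpos (a, b) hq, hdom'.2 b (List.of_mem_zip hq).2⟩
  have hfuel : sumD (List.zipWith finishDay ps ss) ≤ ps.length * 17179869184 + 1 :=
    Nat.le_succ_of_le hb
  have := solLoop_eq (ps.length * 17179869184 + 1) ps ss [] hlen hpos hfuel
  simpa using this
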